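-- pv_equiv track=rewrite | github.com/hlalwael1990-bot/Rent-price-prediction- | src/app_flask.py | get_fixed_bonus_amenities
-- ===== SOURCE A (Python) =====
-- def get_fixed_bonus_amenities(selected_amenities: list[str]) -> list[str]:
--     normalized_to_label = {}
--     for item in selected_amenities:
--         label = str(item).strip()
--         if not label:
--             continue
--         normalized_to_label[label.lower()] = label
--
--     ordered_bonus_keys = [
--         "kitchen",
--         "dedicated workspace",
--         "washer",
--         "hot water",
--         "tv",
--     ]
--
--     return [
--         normalized_to_label[key]
--         for key in ordered_bonus_keys
--         if key in normalized_to_label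
--     ]
-- ===== SOURCE B (Python) =====
-- def get_fixed_bonus_amenities(selected_amenities: list[str]) -> list[str]:
--     result = []
--     for key in ("kitchen", "dedicated workspace", "washer", "hot water", "tv"):
--         for item in reversed(selected_amenities):
--             label = str(item).strip()
--             if label.lower() == key:
--                 result.append(label)
--                 break
--     return result
-- ===== Notes on version B (the rewrite author's own statement) =====
-- stated objective: alternative
-- what changed: Replaces the normalization dict (last-wins index built in one pass, then probed per key) with a direct per-key reverse scan of the input that returns the stripped label of the last matching item, with no dictionary at all.
import Mathlib
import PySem

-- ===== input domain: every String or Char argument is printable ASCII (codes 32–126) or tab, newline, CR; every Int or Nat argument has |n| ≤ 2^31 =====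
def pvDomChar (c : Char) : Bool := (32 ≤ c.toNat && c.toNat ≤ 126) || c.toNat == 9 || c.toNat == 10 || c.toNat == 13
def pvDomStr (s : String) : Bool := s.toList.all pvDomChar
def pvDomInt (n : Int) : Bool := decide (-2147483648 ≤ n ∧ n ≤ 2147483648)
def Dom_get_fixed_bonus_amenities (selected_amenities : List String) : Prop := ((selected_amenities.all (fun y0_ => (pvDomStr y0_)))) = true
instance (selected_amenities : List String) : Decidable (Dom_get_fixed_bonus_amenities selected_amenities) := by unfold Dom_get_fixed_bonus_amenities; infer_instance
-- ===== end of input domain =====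

-- B drops A's normalization dict: for each fixed bonus key it scans the input in reverse
-- and emits the stripped label of the last matching item ('alternative'; not faster).

-- ===== PORT A =====
-- loop body of A's dict-building pass: label = item.strip(); skip if empty; d[label.lower()] = label
def pvStepA (d : PySem.Dict String String) (item : String) : PySem.Dict String String :=
  let label := PySem.Str.strip item
  if label = "" then d else d.insert (PySem.Str.lower label) label

def get_fixed_bonus_amenities (selected_amenities : List String) : List String :=
  let normalized_to_label : PySem.Dict String String :=
    selected_amenities.foldl pvStepA PySem.Dict.empty
  let ordered_bonus_keys : List String :=
    ["kitchen", "dedicated workspace", "washer", "hot water", "tv"]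
  ordered_bonus_keys.foldl (fun acc key =>
    if normalized_to_label.contains key then acc ++ [normalized_to_label.getD key ""]
    else acc) []

-- ===== PORT B =====
def get_fixed_bonus_amenities_alt (selected_amenities : List String) : List String :=
  (["kitchen", "dedicated workspace", "washer", "hot water", "tv"] : List String).foldl
    (fun result key =>
      match selected_amenities.reverse.find?
          (fun item => PySem.Str.lower (PySem.Str.strip item) == key) with
      | some item => result ++ [PySem.Str.strip item]
      | none => result) []

-- ===== PRECONDITION & SPEC =====
def Spec_get_fixed_bonus_amenities (selected_amenities : List String) (out : List String) : Prop := out = get_fixed_bonus_amenities_alt selected_amenities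
instance (selected_amenities : List String) (out : List String) : Decidable (Spec_get_fixed_bonus_amenities selected_amenities out) := by unfold Spec_get_fixed_bonus_amenities; infer_instance

-- ===== CLAIM (what is proved, stated in full; the proofs are below) =====
def Claim_equal_get_fixed_bonus_amenities : Prop := ∀ (selected_amenities : List String), Dom_get_fixed_bonus_amenities selected_amenities → Spec_get_fixed_bonus_amenities selected_amenities (get_fixed_bonus_amenities selected_amenities)

-- ===== LEMMAS AND PROOFS =====

-- Lookup in the dict A builds = last matching item's stripped label (first match of the
-- reversed list), for any nonempty key.
theorem pvDict_get?_eq_find? (xs : List String) (d : PySem.Dict String String)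
    (key : String) (hkey : key ≠ "") :
    (xs.foldl pvStepA d).get? key =
      match xs.reverse.find? (fun item => PySem.Str.lower (PySem.Str.strip item) == key) with
      | some item => some (PySem.Str.strip item)
      | none => d.get? key := by
  induction xs generalizing d with
  | nil => simp
  | cons x rest ih =>
    rw [List.foldl_cons, ih, List.reverse_cons, List.find?_append]
    cases hfind : rest.reverse.find? (fun item => PySem.Str.lower (PySem.Str.strip item) == key) with
    | some item => simp
    | none =>
      simp only [Option.none_or]
      by_cases hp : PySem.Str.lower (PySem.Str.strip x) = key
      · have hne : PySem.Str.strip x ≠ "" := by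
          intro h0; apply hkey; rw [← hp, h0]; rfl
        simp only [List.find?_cons, hp, beq_self_eq_true]
        simp [pvStepA, if_neg hne, hp, PySem.Dict.get?_insert_self]
      · have hb : (PySem.Str.lower (PySem.Str.strip x) == key) = false := by
          simpa using hp
        simp only [List.find?_cons, hb, List.find?_nil]
        unfold pvStepA
        by_cases h0 : PySem.Str.strip x = ""
        · simp [h0]
        · simp only [if_neg h0]
          exact PySem.Dict.get?_insert_of_ne _ _ (fun h => hp h.symm)

-- One comprehension step of A = one loop step of B, for a nonempty key.
theorem pvStep_eq (xs : List String) (key : String) (hkey : key ≠ "") (acc : List String) :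
    (if (xs.foldl pvStepA PySem.Dict.empty).contains key then
        acc ++ [(xs.foldl pvStepA PySem.Dict.empty).getD key ""] else acc) =
      match xs.reverse.find? (fun item => PySem.Str.lower (PySem.Str.strip item) == key) with
      | some item => acc ++ [PySem.Str.strip item]
      | none => acc := by
  have hget := pvDict_get?_eq_find? xs PySem.Dict.empty key hkey
  rw [PySem.Dict.contains_eq_isSome_get?, PySem.Dict.getD_eq_get?_getD, hget]
  cases hfind : xs.reverse.find? (fun item => PySem.Str.lower (PySem.Str.strip item) == key) with
  | some item => simp
  | none => simp [PySem.Dict.get?_empty]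

-- ===== VERDICT (by name: the statement is the Claim_ definition above) =====
theorem get_fixed_bonus_amenities_spec : Claim_equal_get_fixed_bonus_amenities := by
  intro xs _
  show get_fixed_bonus_amenities xs = get_fixed_bonus_amenities_alt xs
  unfold get_fixed_bonus_amenities get_fixed_bonus_amenities_alt
  simp only [List.foldl_cons, List.foldl_nil]
  rw [pvStep_eq xs "kitchen" (by decide), pvStep_eq xs "dedicated workspace" (by decide),
      pvStep_eq xs "washer" (by decide), pvStep_eq xs "hot water" (by decide),
      pvStep_eq xs "tv" (by decide)]
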